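-- pv_equiv track=rewrite | github.com/xolarvill/KWL | src/estimation/em_with_omega.py | _calculate_logging_interval
-- ===== SOURCE A (Python) =====
-- def _calculate_logging_interval(total_individuals: int) -> int:
--     """
--     根据总个体数量计算动态日志输出间隔。
--     间隔为总个体数量的5%，然后取最接近的10^N或5*10^N。
--
--     参数:
--     ----
--     total_individuals : int
--         总个体数量。
--
--     返回:
--     ----
--     int
--         计算出的日志输出间隔。
--     """
--     if total_individuals <= 100:
--         return 10  # 对于小样本，保持较频繁的更新
--
--     target_interval = max(1, int(total_individuals * 0.05))
--
--     # 寻找最接近的10^N或5*10^N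
--     best_interval = 1
--     min_diff = abs(target_interval - 1)
--
--     for power in range(1, 10):  # 考虑足够大的范围
--         val_10 = 10 ** power
--         val_5_10 = 5 * (10 ** power)
--
--         diff_10 = abs(target_interval - val_10)
--         diff_5_10 = abs(target_interval - val_5_10)
--
--         if diff_10 < min_diff:
--             min_diff = diff_10
--             best_interval = val_10
--
--         if diff_5_10 < min_diff:
--             min_diff = diff_5_10
--             best_interval = val_5_10
--
--         if val_10 > target_interval * 2 and val_5_10 > target_interval * 2: # 避免过大的间隔
--             break
--
--     # 确保间隔不会超过总个体数的一半，且至少为1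
--     return max(1, min(best_interval, total_individuals // 2))
-- ===== SOURCE B (Python) =====
-- def _calculate_logging_interval(total_individuals: int) -> int:
--     # Locate the decade of the target arithmetically, then pick the round value by
--     # threshold comparisons -- no candidate table, no running-minimum scan.
--     if total_individuals <= 100:
--         return 10
--     target_interval = max(1, int(total_individuals * 0.05))
--     low = 1
--     while low * 10 <= target_interval:
--         low *= 10
--     if low == 1:
--         best_interval = 1 if 2 * target_interval <= 11 else 10
--     elif 2 * target_interval <= 6 * low:
--         best_interval = low
--     elif 2 * target_interval <= 15 * low:
--         best_interval = 5 * low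
--     else:
--         best_interval = 10 * low
--     return max(1, min(best_interval, total_individuals // 2))
-- ===== Notes on version B (the rewrite author's own statement) =====
-- stated objective: alternative
-- what changed: Replaces A's fixed scan over the candidate table of powers of ten and their five-fold multiples (running minimum with early break) by an arithmetic decade-localization while loop followed by closed-form threshold comparisons that pick the round interval directly.
import Mathlib
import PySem

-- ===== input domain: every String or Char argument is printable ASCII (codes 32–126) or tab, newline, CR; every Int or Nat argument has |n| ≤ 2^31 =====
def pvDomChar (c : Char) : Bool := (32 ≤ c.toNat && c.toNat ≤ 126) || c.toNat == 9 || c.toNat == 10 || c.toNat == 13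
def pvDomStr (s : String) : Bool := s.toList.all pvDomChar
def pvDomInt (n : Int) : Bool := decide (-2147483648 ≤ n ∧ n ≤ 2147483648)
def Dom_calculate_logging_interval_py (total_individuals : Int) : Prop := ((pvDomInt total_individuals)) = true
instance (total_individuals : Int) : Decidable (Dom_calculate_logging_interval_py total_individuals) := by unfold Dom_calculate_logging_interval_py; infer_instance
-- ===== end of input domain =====

-- B replaces A's candidate-table scan with running minimum and early break by arithmetic decade
-- localization (a while loop multiplying by 10) plus three threshold comparisons; same return value,
-- objective: alternative algorithm.


-- ===== PORT A =====
-- one 'if diff < min_diff' update of A's running state (best_interval, min_diff)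
def pvStep (t : Int) (s : Int × Int) (v : Int) : Int × Int :=
  if ((t - v).natAbs : Int) < s.2 then (v, ((t - v).natAbs : Int)) else s

-- the for-loop of A: state (best_interval, min_diff), early 'break' = stop recursing
def pvLoopA (t : Int) : List Int → Int × Int → Int × Int
  | [], s => s
  | p :: ps, s =>
    let v10 : Int := (10 : Int) ^ p.toNat          -- 10 ** power (power ≥ 0 here)
    let v510 : Int := 5 * ((10 : Int) ^ p.toNat)
    let s2 : Int × Int := pvStep t (pvStep t s v10) v510
    if v10 > t * 2 ∧ v510 > t * 2 then s2 else pvLoopA t ps s2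

-- int(total_individuals * 0.05) is ported as floor division by 20: on Dom (0 ≤ n ≤ 2^31, and the
-- branch is only reached for n > 100) the float product n*0.05 truncates to exactly n // 20.
def calculate_logging_interval_py (total_individuals : Int) : Int :=
  if total_individuals ≤ 100 then 10
  else
    let t := max 1 (PySem.Int.floordiv total_individuals 20)
    let r := pvLoopA t (PySem.List.pyRange 1 10 1) (1, ((t - 1).natAbs : Int))
    max 1 (min r.1 (PySem.Int.floordiv total_individuals 2))

-- ===== PORT B =====
-- the 'while low * 10 <= t: low *= 10' loop of B; fuel only makes the recursion structural
-- (t.natAbs steps are always enough since low at least doubles each step)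
def pvLowLoop : Nat → Int → Int → Int
  | 0, low, _ => low
  | fuel + 1, low, t => if low * 10 ≤ t then pvLowLoop fuel (low * 10) t else low

def calculate_logging_interval_py_alt (total_individuals : Int) : Int :=
  if total_individuals ≤ 100 then 10
  else
    let t := max 1 (PySem.Int.floordiv total_individuals 20)
    let low := pvLowLoop t.natAbs 1 t
    let best : Int :=
      if low = 1 then (if 2 * t ≤ 11 then 1 else 10)
      else if 2 * t ≤ 6 * low then low
      else if 2 * t ≤ 15 * low then 5 * low
      else 10 * low
    max 1 (min best (PySem.Int.floordiv total_individuals 2))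

-- ===== PRECONDITION & SPEC =====
def Spec_calculate_logging_interval_py (total_individuals : Int) (out : Int) : Prop := out = calculate_logging_interval_py_alt total_individuals
instance (total_individuals : Int) (out : Int) : Decidable (Spec_calculate_logging_interval_py total_individuals out) := by unfold Spec_calculate_logging_interval_py; infer_instance

-- ===== CLAIM (what is proved, stated in full; the proofs are below) =====
def Claim_equal_calculate_logging_interval_py : Prop := ∀ (total_individuals : Int), Dom_calculate_logging_interval_py total_individuals → Spec_calculate_logging_interval_py total_individuals (calculate_logging_interval_py total_individuals)

-- ===== LEMMAS AND PROOFS =====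

-- the best-interval component of one update: first-wins nearest-to-t choice
def pvB (t b v : Int) : Int :=
  if ((t - v).natAbs : Int) < ((t - b).natAbs : Int) then v else b

theorem pvStep_eq (t b v : Int) :
    pvStep t (b, ((t - b).natAbs : Int)) v = (pvB t b v, ((t - pvB t b v).natAbs : Int)) := by
  simp only [pvStep, pvB]
  split_ifs <;> rfl

theorem pvB_le (t b v : Int) (hb : ((t - b).natAbs : Int) ≤ t - 1) :
    ((t - pvB t b v).natAbs : Int) ≤ t - 1 := by
  unfold pvB; split_ifs with h <;> omega

-- once every remaining candidate is strictly farther from t than the current best, the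
-- first-wins min fold leaves the accumulator unchanged
theorem pvFoldl_no_improve (t : Int) (vs : List Int) (b : Int)
    (h : ∀ v ∈ vs, ¬ ((t - v).natAbs : Int) < ((t - b).natAbs : Int)) :
    vs.foldl (pvB t) b = b := by
  induction vs with
  | nil => rfl
  | cons v vs ih =>
    simp only [List.foldl_cons, pvB, if_neg (h v (List.mem_cons_self))]
    exact ih (fun w hw => h w (List.mem_cons_of_mem _ hw))

-- A's loop computes the first-wins min fold over the flattened candidate table
theorem pvLoopA_eq_fold (t : Int) : ∀ (ps : List Int) (b : Int),
    1 ≤ t → ((t - b).natAbs : Int) ≤ t - 1 →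
    List.Pairwise (· < ·) ps → (∀ p ∈ ps, 1 ≤ p) →
    (pvLoopA t ps (b, ((t - b).natAbs : Int))).1
      = (ps.flatMap (fun p => [(10 : Int) ^ p.toNat, 5 * ((10 : Int) ^ p.toNat)])).foldl (pvB t) b := by
  intro ps
  induction ps with
  | nil => intro b _ _ _ _; rfl
  | cons p ps ih =>
    intro b ht hb hpw hmem
    have hp1 : 1 ≤ p := hmem p (List.mem_cons_self)
    have hb1le : ((t - pvB t b ((10 : Int) ^ p.toNat)).natAbs : Int) ≤ t - 1 := pvB_le t b _ hb
    have hb2le : ((t - pvB t (pvB t b ((10 : Int) ^ p.toNat)) (5 * ((10 : Int) ^ p.toNat))).natAbs : Int) ≤ t - 1 :=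
      pvB_le t _ _ hb1le
    have hflat : (p :: ps).flatMap (fun p => [(10 : Int) ^ p.toNat, 5 * ((10 : Int) ^ p.toNat)])
        = (10 : Int) ^ p.toNat :: 5 * ((10 : Int) ^ p.toNat)
            :: ps.flatMap (fun p => [(10 : Int) ^ p.toNat, 5 * ((10 : Int) ^ p.toNat)]) := by
      simp [List.flatMap_cons]
    rw [hflat]
    simp only [List.foldl_cons]
    simp only [pvLoopA, pvStep_eq]
    by_cases hbr : (10 : Int) ^ p.toNat > t * 2 ∧ 5 * ((10 : Int) ^ p.toNat) > t * 2
    · rw [if_pos hbr]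
      have hbig : ∀ v ∈ ps.flatMap (fun p => [(10 : Int) ^ p.toNat, 5 * ((10 : Int) ^ p.toNat)]),
          t * 2 < v := by
        intro v hv
        simp only [List.mem_flatMap, List.mem_cons] at hv
        obtain ⟨q, hq, hvq⟩ := hv
        have hpq : p < q := (List.pairwise_cons.mp hpw).1 q hq
        have hlt : (10 : Int) ^ p.toNat < (10 : Int) ^ q.toNat := by
          apply pow_lt_pow_right₀ (by norm_num)
          omega
        have h10 : (0 : Int) < (10 : Int) ^ q.toNat := by positivity
        rcases hvq with h | h | h <;> simp_all <;> omega
      refine (pvFoldl_no_improve t _ _ ?_).symm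
      intro v hv
      have := hbig v hv
      omega
    · rw [if_neg hbr]
      exact ih _ ht hb2le (List.pairwise_cons.mp hpw).2
        (fun q hq => hmem q (List.mem_cons_of_mem _ hq))

-- first-wins selection on a sorted list: if x beats every smaller element strictly and no larger
-- element beats it strictly, the fold returns x
theorem pvFold_sorted (t : Int) : ∀ (l : List Int) (a x : Int),
    (a = x ∨ x ∈ l) →
    (a ≠ x → ((t - x).natAbs : Int) < ((t - a).natAbs : Int)) →
    List.Pairwise (· < ·) (a :: l) →
    (∀ c ∈ l, c < x → ((t - x).natAbs : Int) < ((t - c).natAbs : Int)) →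
    (∀ c ∈ l, x < c → ¬ ((t - c).natAbs : Int) < ((t - x).natAbs : Int)) →
    l.foldl (pvB t) a = x := by
  intro l
  induction l with
  | nil =>
    intro a x hmem _ _ _ _
    rcases hmem with rfl | h
    · rfl
    · cases h
  | cons v l ih =>
    intro a x hmem hax hpw hlt hgt
    have hav : a < v := (List.pairwise_cons.mp hpw).1 v (List.mem_cons_self)
    have hvl : ∀ c ∈ l, v < c := (List.pairwise_cons.mp (List.pairwise_cons.mp hpw).2).1
    simp only [List.foldl_cons]
    rcases hmem with rfl | hx
    · -- x = a: v > x, so the step keeps a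
      have hstep : pvB t a v = a := by
        unfold pvB
        rw [if_neg (hgt v (List.mem_cons_self) hav)]
      rw [hstep]
      refine ih a a (Or.inl rfl) (fun h => absurd rfl h) ?_ ?_ ?_
      · exact List.pairwise_cons.mpr ⟨fun c hc => lt_trans hav (hvl c hc),
          (List.pairwise_cons.mp (List.pairwise_cons.mp hpw).2).2⟩
      · intro c hc hcx; exact hlt c (List.mem_cons_of_mem _ hc) hcx
      · intro c hc hxc; exact hgt c (List.mem_cons_of_mem _ hc) hxc
    · rcases List.mem_cons.mp hx with rfl | hxl
      · -- x = v
        have hstep : pvB t a x = x := by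
          unfold pvB
          rw [if_pos (hax (by omega))]
        rw [hstep]
        refine ih x x (Or.inl rfl) (fun h => absurd rfl h) ?_ ?_ ?_
        · exact List.pairwise_cons.mpr ⟨hvl, (List.pairwise_cons.mp (List.pairwise_cons.mp hpw).2).2⟩
        · intro c hc hcx; exact absurd (hvl c hc) (by omega)
        · intro c hc hxc; exact hgt c (List.mem_cons_of_mem _ hc) hxc
      · -- x ∈ l, v < x
        have hvx : v < x := hvl x hxl
        have hstep : ((t - x).natAbs : Int) < ((t - pvB t a v).natAbs : Int) := by
          have h1 : ((t - x).natAbs : Int) < ((t - a).natAbs : Int) := hax (by omega)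
          have h2 : ((t - x).natAbs : Int) < ((t - v).natAbs : Int) :=
            hlt v (List.mem_cons_self) hvx
          unfold pvB; split_ifs <;> assumption
        have hbv : pvB t a v = a ∨ pvB t a v = v := by
          unfold pvB; split_ifs <;> simp
        refine ih (pvB t a v) x (Or.inr hxl) (fun _ => hstep) ?_ ?_ ?_
        · refine List.pairwise_cons.mpr ⟨?_, (List.pairwise_cons.mp (List.pairwise_cons.mp hpw).2).2⟩
          intro c hc
          rcases hbv with h | h <;> rw [h]
          · exact lt_trans hav (hvl c hc)
          · exact hvl c hc
        · intro c hc hcx; exact hlt c (List.mem_cons_of_mem _ hc) hcx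
        · intro c hc hxc; exact hgt c (List.mem_cons_of_mem _ hc) hxc

-- the while loop of B: returns low * 10^k, the last power-of-ten multiple of low not above t
theorem pvLowLoop_spec : ∀ (fuel : Nat) (low t : Int), 0 < low → low ≤ t → t < low * 10 ^ fuel →
    ∃ k : Nat, pvLowLoop fuel low t = low * 10 ^ k ∧ low * 10 ^ k ≤ t ∧ t < low * 10 ^ (k + 1) := by
  intro fuel
  induction fuel with
  | zero => intro low t h1 h2 h3; simp at h3; omega
  | succ fuel ih =>
    intro low t h1 h2 h3
    simp only [pvLowLoop]
    by_cases h : low * 10 ≤ t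
    · rw [if_pos h]
      obtain ⟨k, hk1, hk2, hk3⟩ := ih (low * 10) t (by positivity) h
        (by rw [pow_succ] at h3; linarith [h3]; )
      refine ⟨k + 1, by rw [hk1]; ring, ?_, ?_⟩
      · rw [show low * 10 ^ (k + 1) = low * 10 * 10 ^ k from by ring]; exact hk2
      · rw [show low * 10 ^ (k + 1 + 1) = low * 10 * 10 ^ (k + 1) from by ring]; exact hk3
    · rw [if_neg h]
      exact ⟨0, by ring, by simpa using h2, by rw [pow_one]; omega⟩

-- the concrete candidate table A's loop ranges over
def pvCands : List Int :=
  [10, 50, 100, 500, 1000, 5000, 10000, 50000, 100000, 500000,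
   1000000, 5000000, 10000000, 50000000, 100000000, 500000000, 1000000000, 5000000000]

theorem pvCands_flat :
    (PySem.List.pyRange 1 10 1).flatMap (fun p => [(10 : Int) ^ p.toNat, 5 * ((10 : Int) ^ p.toNat)])
      = pvCands := by decide

-- main arithmetic fact: on the decade 10^k ≤ t < 10^(k+1) (k ≤ 8 under Dom) the first-wins
-- nearest-candidate fold equals B's threshold formula
theorem pvMain (t : Int) (k : Nat) (hk : k ≤ 8) (h1 : (10 : Int) ^ k ≤ t) (h2 : t < (10 : Int) ^ (k + 1)) :
    pvCands.foldl (pvB t) 1 =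
      (if ((10 : Int) ^ k) = 1 then (if 2 * t ≤ 11 then 1 else 10)
       else if 2 * t ≤ 6 * (10 : Int) ^ k then (10 : Int) ^ k
       else if 2 * t ≤ 15 * (10 : Int) ^ k then 5 * (10 : Int) ^ k
       else 10 * (10 : Int) ^ k) := by
  interval_cases k <;>
    norm_num <;>
    split_ifs <;>
    · refine pvFold_sorted t pvCands 1 _ (by decide) (by intro _; omega) (by decide) ?_ ?_ <;>
        (intro c hc; simp only [pvCands, List.mem_cons, List.not_mem_nil, or_false] at hc; omega)

-- ===== VERDICT (by name: the statement is the Claim_ definition above) =====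
theorem calculate_logging_interval_py_spec : Claim_equal_calculate_logging_interval_py := by
  intro n hdom
  unfold Spec_calculate_logging_interval_py calculate_logging_interval_py calculate_logging_interval_py_alt
  by_cases h : n ≤ 100
  · simp [h]
  · rw [if_neg h, if_neg h]
    dsimp only
    set t := max 1 (PySem.Int.floordiv n 20) with htdef
    have ht1 : 1 ≤ t := le_max_left _ _
    have hdiv : PySem.Int.floordiv n 20 = n / 20 :=
      PySem.Int.floordiv_eq_ediv_of_pos (by norm_num)
    have hn : -2147483648 ≤ n ∧ n ≤ 2147483648 := by
      unfold Dom_calculate_logging_interval_py pvDomInt at hdom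
      simpa using hdom
    have htub : t ≤ 107374182 := by
      rw [htdef, hdiv]; omega
    -- B's while loop lands on the decade of t
    obtain ⟨k, hk1, hk2, hk3⟩ := pvLowLoop_spec t.natAbs 1 t (by norm_num) ht1
      (by
        have h1 : t.natAbs < 10 ^ t.natAbs := Nat.lt_pow_self (by norm_num)
        have h2 : ((t.natAbs : Int)) < (((10 : Nat) ^ t.natAbs : Nat) : Int) := by exact_mod_cast h1
        rw [one_mul]
        calc t = (t.natAbs : Int) := by omega
          _ < (((10 : Nat) ^ t.natAbs : Nat) : Int) := h2
          _ = (10 : Int) ^ t.natAbs := by push_cast; ring)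
    simp only [one_mul] at hk1 hk2 hk3
    have hk8 : k ≤ 8 := by
      by_contra hcon
      have h9 : (10 : Int) ^ 9 ≤ (10 : Int) ^ k :=
        pow_le_pow_right₀ (by norm_num) (by omega)
      norm_num at h9
      omega
    have hA : (pvLoopA t (PySem.List.pyRange 1 10 1) (1, ((t - 1).natAbs : Int))).1
        = pvCands.foldl (pvB t) 1 := by
      rw [pvLoopA_eq_fold t (PySem.List.pyRange 1 10 1) 1 ht1 (by omega)
        (by rw [show PySem.List.pyRange 1 10 1 = [1, 2, 3, 4, 5, 6, 7, 8, 9] from by decide]; decide)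
        (by rw [show PySem.List.pyRange 1 10 1 = [1, 2, 3, 4, 5, 6, 7, 8, 9] from by decide]; decide),
        pvCands_flat]
    rw [hA, hk1, pvMain t k hk8 hk2 hk3]
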